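-- pv_equiv track=rewrite | github.com/AleksandraMostowska/pp1 | 06-Arrays/after class/zad42.py | find_biggest
-- ===== SOURCE A (Python) =====
-- def find_biggest(arr: list[list[int]]) -> list[int]:
--     biggest = -100000
--     biggestRow = -1
--     biggestCol = -1
--
--     for i in range(len(arr)):
--         for j in range(len(arr[i])):
--             if arr[i][j] > biggest:
--                 biggest = arr[i][j]
--                 biggestRow, biggestCol = i, j
--
--     return [biggest, biggestRow, biggestCol]
-- ===== SOURCE B (Python) =====
-- def find_biggest(arr: list[list[int]]) -> list[int]:
--     biggest, row, col = -100000, -1, -1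
--     for i, r in enumerate(arr):
--         if r:
--             m = max(r)
--             if m > biggest:
--                 biggest, row, col = m, i, r.index(m)
--     return [biggest, row, col]
-- ===== Notes on version B (the rewrite author's own statement) =====
-- stated objective: alternative
-- what changed: Replaces the flat element-by-element nested index loops with a two-phase per-row reduction: each row is first reduced with max(), and only a row whose maximum beats the running best updates the state, with the column recovered by a first-occurrence index lookup.
import Mathlib
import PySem

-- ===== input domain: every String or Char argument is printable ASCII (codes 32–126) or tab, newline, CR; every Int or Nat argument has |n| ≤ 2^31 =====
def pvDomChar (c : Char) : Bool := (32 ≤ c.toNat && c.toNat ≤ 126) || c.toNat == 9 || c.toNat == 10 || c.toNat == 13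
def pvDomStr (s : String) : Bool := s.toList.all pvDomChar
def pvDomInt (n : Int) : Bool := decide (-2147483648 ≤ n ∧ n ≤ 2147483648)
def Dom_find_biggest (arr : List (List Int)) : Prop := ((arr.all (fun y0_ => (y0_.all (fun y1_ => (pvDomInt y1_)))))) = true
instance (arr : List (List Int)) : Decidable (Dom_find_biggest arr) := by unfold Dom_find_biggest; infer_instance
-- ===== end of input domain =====

-- B is an alternative decomposition (per-row max, then pick across rows); same cost, proven equal everywhere.

-- ===== PORT A =====
-- inner loop: for j in range(len(arr[i])): if arr[i][j] > biggest: update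
def fbInner (i : Int) : List Int → Int → Int × Int × Int → Int × Int × Int
  | [], _, st => st
  | x :: xs, j, (b, br, bc) =>
    if x > b then fbInner i xs (j + 1) (x, i, j) else fbInner i xs (j + 1) (b, br, bc)

-- outer loop: for i in range(len(arr))
def fbOuter : List (List Int) → Int → Int × Int × Int → Int × Int × Int
  | [], _, st => st
  | r :: rest, i, st => fbOuter rest (i + 1) (fbInner i r 0 st)

def find_biggest (arr : List (List Int)) : List Int :=
  let st := fbOuter arr 0 (-100000, -1, -1)
  [st.1, st.2.1, st.2.2]

-- ===== PORT B =====
-- one enumerate step: if r: m = max(r); if m > biggest: update with col = r.index(m)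
def fbRow (st : Int × Int × Int) (p : Int × List Int) : Int × Int × Int :=
  match PySem.List.max? p.2 (fun y => y) with
  | none => st
  | some m =>
    if m > st.1 then (m, p.1, (((PySem.List.index? p.2 m).getD 0 : Nat) : Int)) else st

def find_biggest_alt (arr : List (List Int)) : List Int :=
  let st := (PySem.List.enumerate arr 0).foldl fbRow (-100000, -1, -1)
  [st.1, st.2.1, st.2.2]

-- ===== PRECONDITION & SPEC =====
def Spec_find_biggest (arr : List (List Int)) (out : List Int) : Prop := out = find_biggest_alt arr
instance (arr : List (List Int)) (out : List Int) : Decidable (Spec_find_biggest arr out) := by unfold Spec_find_biggest; infer_instance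

-- ===== CLAIM (what is proved, stated in full; the proofs are below) =====
def Claim_equal_find_biggest : Prop := ∀ (arr : List (List Int)), Dom_find_biggest arr → Spec_find_biggest arr (find_biggest arr)

-- ===== LEMMAS AND PROOFS =====

lemma foldl_max_comm (xs : List Int) (a c : Int) :
    xs.foldl max (max a c) = max a (xs.foldl max c) := by
  induction xs generalizing c with
  | nil => rfl
  | cons y ys ih =>
      simp only [List.foldl_cons]
      rw [max_assoc, ih]

lemma le_foldl_max' (xs : List Int) (b : Int) : b ≤ xs.foldl max b := by
  induction xs generalizing b with
  | nil => exact le_refl _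
  | cons x xs ih =>
      simp only [List.foldl_cons]
      exact le_trans (le_max_left b x) (ih _)

lemma foldl_max_mem (xs : List Int) (b : Int) :
    xs.foldl max b = b ∨ xs.foldl max b ∈ xs := by
  induction xs generalizing b with
  | nil => exact Or.inl rfl
  | cons x xs ih =>
      simp only [List.foldl_cons]
      rcases ih (max b x) with h | h
      · rcases le_total x b with hb | hb
        · left; rw [h]; exact max_eq_left hb
        · right; rw [h]; simp [max_eq_right hb]
      · right; exact List.mem_cons_of_mem _ h

-- the inner loop computed in closed form: running max plus first index of the max
lemma fbInner_eq (xs : List Int) (i : Int) : ∀ (j b br bc : Int),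
    fbInner i xs j (b, br, bc) =
      if b < xs.foldl max b
      then (xs.foldl max b, i, j + (((PySem.List.index? xs (xs.foldl max b)).getD 0 : Nat) : Int))
      else (b, br, bc) := by
  induction xs with
  | nil => intro j b br bc; simp [fbInner]
  | cons x xs ih =>
      intro j b br bc
      have hM : ∀ c : Int, (x :: xs).foldl max c = max c (xs.foldl max x) := by
        intro c; simp only [List.foldl_cons]; rw [← foldl_max_comm]
      by_cases hx : x > b
      · simp only [fbInner, if_pos hx, ih]
        have hMb : b < (x :: xs).foldl max b := by
          rw [hM]; exact lt_of_lt_of_le hx (le_trans (le_foldl_max' xs x) (le_max_right _ _))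
        rw [if_pos hMb]
        by_cases hxm : x < xs.foldl max x
        · rw [if_pos hxm]
          have hmemne : xs.foldl max x ∈ xs := by
            rcases foldl_max_mem xs x with h | h
            · exact absurd h (by intro h'; rw [h'] at hxm; exact lt_irrefl _ hxm)
            · exact h
          have hval : (x :: xs).foldl max b = xs.foldl max x := by
            rw [hM]; exact max_eq_right (le_of_lt (lt_trans hx hxm))
          have hne : x ≠ xs.foldl max x := ne_of_lt hxm
          have hidx : PySem.List.index? (x :: xs) (xs.foldl max x) =
              (PySem.List.index? xs (xs.foldl max x)).map (· + 1) :=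
            PySem.List.index?_cons_of_ne xs hne
          have hsome : (PySem.List.index? xs (xs.foldl max x)).isSome :=
            (PySem.List.index?_isSome_iff _ _).mpr hmemne
          rcases Option.isSome_iff_exists.mp hsome with ⟨k, hk⟩
          rw [hval, hidx, hk]
          simp only [Option.map_some, Option.getD_some]
          refine Prod.ext rfl (Prod.ext rfl ?_)
          push_cast; ring
        · rw [if_neg hxm]
          have hxe : xs.foldl max x = x :=
            le_antisymm (not_lt.mp hxm) (le_foldl_max' xs x)
          have hval : (x :: xs).foldl max b = x := by
            rw [hM, hxe]; exact max_eq_right (le_of_lt hx)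
          rw [hval, PySem.List.index?_cons_self]
          simp
      · simp only [fbInner, if_neg hx, ih]
        have hxb : x ≤ b := not_lt.mp hx
        by_cases hMb : b < xs.foldl max b
        · rw [if_pos hMb]
          have hval : (x :: xs).foldl max b = xs.foldl max b := by
            simp only [List.foldl_cons]; rw [max_eq_left hxb]
          have hMb' : b < (x :: xs).foldl max b := by rw [hval]; exact hMb
          rw [if_pos hMb']
          have hne : x ≠ xs.foldl max b := ne_of_lt (lt_of_le_of_lt hxb hMb)
          have hmemne : xs.foldl max b ∈ xs := by
            rcases foldl_max_mem xs b with h | h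
            · exact absurd h (by intro h'; rw [h'] at hMb; exact lt_irrefl _ hMb)
            · exact h
          have hsome : (PySem.List.index? xs (xs.foldl max b)).isSome :=
            (PySem.List.index?_isSome_iff _ _).mpr hmemne
          rcases Option.isSome_iff_exists.mp hsome with ⟨k, hk⟩
          rw [hval, PySem.List.index?_cons_of_ne xs hne, hk]
          simp only [Option.map_some, Option.getD_some]
          refine Prod.ext rfl (Prod.ext rfl ?_)
          push_cast; ring
        · rw [if_neg hMb]
          have hval : (x :: xs).foldl max b = xs.foldl max b := by
            simp only [List.foldl_cons]; rw [max_eq_left hxb]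
          rw [hval, if_neg hMb]

-- one row of A's loop equals one fbRow step of B
lemma fbInner_eq_fbRow (r : List Int) (i : Int) (st : Int × Int × Int) :
    fbInner i r 0 st = fbRow st (i, r) := by
  obtain ⟨b, br, bc⟩ := st
  cases r with
  | nil => simp [fbInner, fbRow, PySem.List.max?]
  | cons x xs =>
      rw [fbInner_eq]
      have hmax : PySem.List.max? (x :: xs) (fun y => y) = some (xs.foldl max x) :=
        PySem.List.max?_id_cons x xs
      simp only [fbRow, hmax]
      have hval : (x :: xs).foldl max b = max b (xs.foldl max x) := by
        simp only [List.foldl_cons]; rw [← foldl_max_comm]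
      by_cases h : xs.foldl max x > b
      · have hcond : b < (x :: xs).foldl max b := by rw [hval]; simp [h]
        rw [if_pos hcond, if_pos h]
        have : (x :: xs).foldl max b = xs.foldl max x := by
          rw [hval]; exact max_eq_right (le_of_lt h)
        rw [this]; simp
      · have hcond : ¬ b < (x :: xs).foldl max b := by
          rw [hval]; exact not_lt.mpr (max_le (le_refl b) (not_lt.mp h))
        rw [if_neg hcond, if_neg h]

lemma fbOuter_eq_foldl (arr : List (List Int)) : ∀ (i : Int) (st : Int × Int × Int),
    fbOuter arr i st = (PySem.List.enumerate arr i).foldl fbRow st := by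
  induction arr with
  | nil => intro i st; simp [fbOuter, PySem.List.enumerate_nil]
  | cons r rest ih =>
      intro i st
      rw [PySem.List.enumerate_cons]
      simp only [fbOuter, List.foldl_cons, ih, fbInner_eq_fbRow]

-- ===== VERDICT (by name: the statement is the Claim_ definition above) =====
theorem find_biggest_spec : Claim_equal_find_biggest := by
  intro arr _
  unfold Spec_find_biggest find_biggest find_biggest_alt
  rw [fbOuter_eq_foldl]
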